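-- pv_equiv track=rewrite | github.com/pypi-data/pypi-mirror-400 | packages/ssrjson/ssrjson-0.0.10.tar.gz/ssrjson-0.0.10/python-test/test_pretty_minify.py | _find_insertion_points
-- ===== SOURCE A (Python) =====
-- def _find_insertion_points(content: str, start_idx: int):
--     def _in_word(c):
--         return (
--             c == '"'
--             or (ord(c) >= ord("a") and ord(c) <= ord("z"))
--             or (ord(c) >= ord("0") and ord(c) <= ord("9"))
--         )
--
--     entered = False
--     insertion_points = []
--
--     for idx, c in enumerate(content[start_idx:]):
--         idx += start_idx
--         if _in_word(c):
--             if not entered: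
--                 insertion_points.append(idx)
--                 entered = True
--             else:
--                 continue
--         else:
--             if entered:
--                 insertion_points.append(idx)
--                 entered = False
--             else:
--                 insertion_points.append(idx)
--     insertion_points.reverse()
--     return insertion_points
-- ===== SOURCE B (Python) =====
-- def _find_insertion_points(content: str, start_idx: int):
--     def _in_word(c):
--         return c == '"' or "a" <= c <= "z" or "0" <= c <= "9"
--
--     sub = content[start_idx:]
--     n = len(sub)
--     # stage 1: index the maximal word runs; their interior indices are excluded
--     excluded = set()
--     i = 0
--     while i < n:
--         if _in_word(sub[i]):
--             j = i + 1
--             while j < n and _in_word(sub[j]):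
--                 j += 1
--             excluded.update(range(i + 1, j))
--             i = j
--         else:
--             i += 1
--     # stage 2: keep every non-excluded index, emitted back-to-front
--     return [j + start_idx for j in range(n - 1, -1, -1) if j not in excluded]
-- ===== Notes on version B (the rewrite author's own statement) =====
-- stated objective: alternative
-- what changed: Replaces A's single-pass entered-flag state machine by two staged passes: a run-indexing scan that collects the interior indices of maximal word runs into an exclusion set, then a reverse pass over all indices that emits every non-excluded one (no final reverse()).
import Mathlib
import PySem

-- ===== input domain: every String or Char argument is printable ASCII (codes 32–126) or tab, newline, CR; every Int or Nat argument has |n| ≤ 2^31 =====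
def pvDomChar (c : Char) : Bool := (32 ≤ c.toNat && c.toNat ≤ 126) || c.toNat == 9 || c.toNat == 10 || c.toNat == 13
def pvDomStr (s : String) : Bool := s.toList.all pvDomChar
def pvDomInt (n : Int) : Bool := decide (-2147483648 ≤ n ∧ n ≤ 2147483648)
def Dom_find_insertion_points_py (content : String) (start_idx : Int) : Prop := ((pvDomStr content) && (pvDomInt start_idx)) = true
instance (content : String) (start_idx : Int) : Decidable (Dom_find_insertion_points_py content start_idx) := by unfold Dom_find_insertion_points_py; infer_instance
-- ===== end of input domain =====

-- B replaces A's single-pass entered-flag state machine by two staged passes: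
-- index the maximal word runs (interiors go into an exclusion set), then emit
-- all non-excluded indices back-to-front; objective: alternative, same cost.

-- ===== PORT A =====
-- A's nested helper _in_word, written with ord comparisons as in A
def pvInWordA (c : Char) : Bool :=
  c == '"' || (97 ≤ c.toNat && c.toNat ≤ 122) || (48 ≤ c.toNat && c.toNat ≤ 57)

-- A's loop body (the if/else ladder of A's for-loop, verbatim)
def pvStepA (start_idx : Int) (st : Bool × List Int) (p : Int × Char) : Bool × List Int :=
  let idx := p.1 + start_idx
  if pvInWordA p.2 then
    if !st.1 then (true, st.2 ++ [idx]) else (true, st.2)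
  else
    if st.1 then (false, st.2 ++ [idx]) else (false, st.2 ++ [idx])

def find_insertion_points_py (content : String) (start_idx : Int) : List Int :=
  let sub := PySem.Chars.slice content.toList (some start_idx) none
  let st := (PySem.List.enumerate sub 0).foldl (pvStepA start_idx) (false, [])
  st.2.reverse

-- ===== PORT B =====
-- B's nested helper _in_word, written with char comparisons as in B
def pvInWordB (c : Char) : Bool :=
  c == '"' || ('a' ≤ c && c ≤ 'z') || ('0' ≤ c && c ≤ '9')

-- B's inner while loop: 'j = i + 1; while j < n and _in_word(sub[j]): j += 1'
-- (sub.getD j ' ' is exact here: it is only read under the guard j < sub.length)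
def pvRunEnd (sub : List Char) (j : Nat) : Nat :=
  if h : j < sub.length then
    if pvInWordB (sub.getD j ' ') then pvRunEnd sub (j + 1) else j
  else j
termination_by sub.length - j

-- cited by pvExcl's decreasing_by: the inner while never moves left
lemma le_pvRunEnd (sub : List Char) (j : Nat) : j ≤ pvRunEnd sub j := by
  fun_induction pvRunEnd sub j <;> omega

-- B's outer while loop: collect the interior indices of each maximal word run
-- (range(i+1, j) with i+1 ≤ j is List.range' (i+1) (j-(i+1)) — exact, step 1, Nat indices)
def pvExcl (sub : List Char) (i : Nat) (acc : PySem.Set Nat) : PySem.Set Nat :=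
  if h : i < sub.length then
    if pvInWordB (sub.getD i ' ') then
      let j := pvRunEnd sub (i + 1)
      pvExcl sub j (PySem.Set.update acc (List.range' (i + 1) (j - (i + 1))))
    else pvExcl sub (i + 1) acc
  else acc
termination_by sub.length - i
decreasing_by
  · have := le_pvRunEnd sub (i + 1); omega
  · omega

def find_insertion_points_py_alt (content : String) (start_idx : Int) : List Int :=
  let sub := PySem.Chars.slice content.toList (some start_idx) none
  let excluded := pvExcl sub 0 PySem.Set.empty
  -- range(n-1, -1, -1) over the (nonnegative) local indices = (List.range n).reverse — exact
  ((List.range sub.length).reverse.filter (fun j => !(PySem.Set.contains excluded j))).map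
    (fun (j : Nat) => (j : Int) + start_idx)

-- ===== PRECONDITION & SPEC =====
def Spec_find_insertion_points_py (content : String) (start_idx : Int) (out : List Int) : Prop := out = find_insertion_points_py_alt content start_idx
instance (content : String) (start_idx : Int) (out : List Int) : Decidable (Spec_find_insertion_points_py content start_idx out) := by unfold Spec_find_insertion_points_py; infer_instance

-- ===== CLAIM (what is proved, stated in full; the proofs are below) =====
def Claim_equal_find_insertion_points_py : Prop := ∀ (content : String) (start_idx : Int), Dom_find_insertion_points_py content start_idx → Spec_find_insertion_points_py content start_idx (find_insertion_points_py content start_idx)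

-- ===== LEMMAS AND PROOFS =====

lemma pvInWordB_eq (c : Char) : pvInWordB c = pvInWordA c := by
  simp only [pvInWordA, pvInWordB, Char.le_def, UInt32.le_iff_toNat_le]
  rfl

-- the list of kept indices, in forward order: emit i unless c continues a word run
def pvBuild : List Char → Int → Bool → List Int
  | [], _, _ => []
  | c :: cs, i, e =>
    if pvInWordA c then
      if e then pvBuild cs (i + 1) true else i :: pvBuild cs (i + 1) true
    else i :: pvBuild cs (i + 1) false

lemma pvLoopA (start_idx : Int) (cs : List Char) :
    ∀ (k : Int) (e : Bool) (pts : List Int),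
    ((PySem.List.enumerate cs k).foldl (pvStepA start_idx) (e, pts)).2
      = pts ++ pvBuild cs (k + start_idx) e := by
  induction cs with
  | nil => intro k e pts; simp [PySem.List.enumerate_nil, pvBuild]
  | cons c cs ih =>
    intro k e pts
    have harith : k + 1 + start_idx = k + start_idx + 1 := by ring
    simp only [PySem.List.enumerate_cons, List.foldl_cons]
    by_cases hw : pvInWordA c
    · cases e
      · rw [show pvStepA start_idx (false, pts) (k, c) = (true, pts ++ [k + start_idx]) from by
          simp [pvStepA, hw]]
        rw [ih (k + 1) true (pts ++ [k + start_idx]), harith]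
        simp [pvBuild, hw]
      · rw [show pvStepA start_idx (true, pts) (k, c) = (true, pts) from by simp [pvStepA, hw]]
        rw [ih (k + 1) true pts, harith]
        simp [pvBuild, hw]
    · cases e <;>
      · rw [show pvStepA start_idx (_, pts) (k, c) = (false, pts ++ [k + start_idx]) from by
          simp [pvStepA, hw]]
        rw [ih (k + 1) false (pts ++ [k + start_idx]), harith]
        simp [pvBuild, hw]

-- run-end facts
lemma pvRunEnd_le (sub : List Char) (j : Nat) (h : j ≤ sub.length) :
    pvRunEnd sub j ≤ sub.length := by
  fun_induction pvRunEnd sub j <;> omega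

lemma pvRunEnd_word (sub : List Char) (j : Nat) :
    ∀ k, j ≤ k → k < pvRunEnd sub j → pvInWordB (sub.getD k ' ') = true := by
  fun_induction pvRunEnd sub j with
  | case1 j hj hw ih =>
    intro k hk hk'
    rcases Nat.eq_or_lt_of_le hk with rfl | hlt
    · exact hw
    · exact ih k hlt hk'
  | case2 j hj hw => intro k hk hk'; omega
  | case3 j hj => intro k hk hk'; omega

lemma pvRunEnd_stop (sub : List Char) (j : Nat) (h : pvRunEnd sub j < sub.length) :
    pvInWordB (sub.getD (pvRunEnd sub j) ' ') = false := by
  fun_induction pvRunEnd sub j with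
  | case1 j hj hw ih => exact ih h
  | case2 j hj hw => simpa using hw
  | case3 j hj => omega

-- membership in B's exclusion set: exactly the interior indices of word runs from i on
lemma mem_pvExcl (sub : List Char) :
    ∀ (i : Nat) (acc : PySem.Set Nat) (x : Nat), i ≤ sub.length →
    (x ∈ pvExcl sub i acc ↔ x ∈ acc ∨
      (i < x ∧ x < sub.length ∧ pvInWordB (sub.getD (x - 1) ' ') = true ∧
        pvInWordB (sub.getD x ' ') = true)) := by
  intro i acc x hi
  fun_induction pvExcl sub i acc with
  | case1 i acc hlt hw j ih =>
    have hj : j = pvRunEnd sub (i + 1) := rfl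
    clear_value j
    subst hj
    have hj1 : i + 1 ≤ pvRunEnd sub (i + 1) := le_pvRunEnd sub (i + 1)
    have hjn : pvRunEnd sub (i + 1) ≤ sub.length := pvRunEnd_le sub (i + 1) (by omega)
    rw [ih hjn, PySem.Set.mem_update, List.mem_range'_1]
    constructor
    · rintro ((hx | hx) | hx)
      · exact Or.inl hx
      · refine Or.inr ⟨by omega, by omega, ?_, ?_⟩
        · rcases Nat.eq_or_lt_of_le (show i + 1 ≤ x by omega) with rfl | hlt'
          · simpa using hw
          · exact pvRunEnd_word sub (i + 1) (x - 1) (by omega) (by omega)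
        · exact pvRunEnd_word sub (i + 1) x (by omega) (by omega)
      · exact Or.inr ⟨by omega, hx.2.1, hx.2.2.1, hx.2.2.2⟩
    · rintro (hx | ⟨hix, hxn, hp, hc⟩)
      · exact Or.inl (Or.inl hx)
      · by_cases hxj : x < pvRunEnd sub (i + 1)
        · exact Or.inl (Or.inr ⟨by omega, by omega⟩)
        · rcases Nat.eq_or_lt_of_le (show pvRunEnd sub (i + 1) ≤ x by omega) with rfl | hlt'
          · exact absurd hc (by rw [pvRunEnd_stop sub (i + 1) (by omega)]; simp)
          · exact Or.inr ⟨hlt', hxn, hp, hc⟩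
  | case2 i acc hlt hw ih =>
    rw [ih (by omega)]
    constructor
    · rintro (hx | hx)
      · exact Or.inl hx
      · exact Or.inr ⟨by omega, hx.2.1, hx.2.2.1, hx.2.2.2⟩
    · rintro (hx | ⟨hix, hxn, hp, hc⟩)
      · exact Or.inl hx
      · refine Or.inr ⟨?_, hxn, hp, hc⟩
        rcases Nat.eq_or_lt_of_le (show i + 1 ≤ x by omega) with rfl | h'
        · simp only [Nat.add_sub_cancel] at hp
          exact absurd hp hw
        · omega
  | case3 i acc h =>
    constructor
    · exact Or.inl
    · rintro (hx | hx)
      · exact hx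
      · omega

-- the forward filtered index list IS pvBuild, for any window cs of sub starting at base
lemma pvFilterBuild (cs : List Char) :
    ∀ (base : Nat) (e : Bool) (start : Int) (q : Nat → Bool),
    (∀ k, k < cs.length →
      q (base + k) = !((if k = 0 then e else pvInWordA (cs.getD (k - 1) ' ')) &&
        pvInWordA (cs.getD k ' '))) →
    ((List.range' base cs.length).filter q).map (fun (j : Nat) => (j : Int) + start)
      = pvBuild cs ((base : Int) + start) e := by
  induction cs with
  | nil => intro base e start q hq; simp [pvBuild]
  | cons c cs ih =>
    intro base e start q hq
    have hhead : q base = !(e && pvInWordA c) := by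
      have := hq 0 (by simp); simpa using this
    have htail : ((List.range' (base + 1) cs.length).filter q).map (fun (j : Nat) => (j : Int) + start)
        = pvBuild cs (((base + 1 : Nat) : Int) + start) (pvInWordA c) := by
      apply ih
      intro k hk
      have := hq (k + 1) (by simpa using Nat.succ_lt_succ hk)
      rw [show base + (k + 1) = base + 1 + k by omega] at this
      rw [this]
      cases k with
      | zero => simp
      | succ m => simp
    have hcast : ((base + 1 : Nat) : Int) + start = (base : Int) + start + 1 := by push_cast; ring
    rw [List.length_cons, List.range'_succ, List.filter_cons, hhead]
    by_cases hwc : pvInWordA c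
    · cases e
      · simp only [hwc, Bool.and_true, Bool.not_false, if_true, List.map_cons]
        rw [htail, hcast]; simp [pvBuild, hwc]
      · simp only [hwc, Bool.and_true, Bool.not_true, Bool.false_eq_true, if_false]
        rw [htail, hcast]; simp [pvBuild, hwc]
    · simp only [hwc, Bool.and_false, Bool.not_false, if_true, List.map_cons]
      rw [htail, hcast]
      simp [pvBuild, hwc]

-- assembly on the common slice
lemma pvMain (sub : List Char) (start : Int) :
    ((PySem.List.enumerate sub 0).foldl (pvStepA start) (false, [])).2.reverse
      = ((List.range sub.length).reverse.filter
          (fun j => !(PySem.Set.contains (pvExcl sub 0 PySem.Set.empty) j))).map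
          (fun (j : Nat) => (j : Int) + start) := by
  have hmem : ∀ y, y ∈ pvExcl sub 0 PySem.Set.empty ↔
      (0 < y ∧ y < sub.length ∧ pvInWordB (sub.getD (y - 1) ' ') = true ∧
        pvInWordB (sub.getD y ' ') = true) := by
    intro y
    rw [mem_pvExcl sub 0 PySem.Set.empty y (Nat.zero_le _)]
    simp [PySem.Set.empty]
  rw [pvLoopA start sub 0 false [], List.filter_reverse, List.map_reverse, List.nil_append]
  congr 1
  rw [List.range_eq_range']
  rw [pvFilterBuild sub 0 false start _ ?_]
  · norm_num
  · intro k hk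
    simp only [Nat.zero_add]
    by_cases hmemk : k ∈ pvExcl sub 0 PySem.Set.empty
    · have h1 : PySem.Set.contains (pvExcl sub 0 PySem.Set.empty) k = true :=
        (PySem.Set.contains_iff _ k).mpr hmemk
      rw [h1]
      obtain ⟨hk0, -, hp, hc⟩ := (hmem k).mp hmemk
      rw [if_neg (by omega)]
      rw [pvInWordB_eq] at hp hc
      rw [hp, hc]
      rfl
    · have h1 : PySem.Set.contains (pvExcl sub 0 PySem.Set.empty) k = false := by
        cases hcc : PySem.Set.contains (pvExcl sub 0 PySem.Set.empty) k with
        | false => rfl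
        | true => exact absurd (((PySem.Set.contains_iff _ k).mp hcc)) hmemk
      rw [h1]
      cases k with
      | zero => simp
      | succ m =>
        rw [if_neg (Nat.succ_ne_zero m)]
        have hno : ¬(pvInWordB (sub.getD m ' ') = true ∧ pvInWordB (sub.getD (m + 1) ' ') = true) := by
          rintro ⟨ha, hb⟩
          exact hmemk ((hmem (m + 1)).mpr ⟨Nat.succ_pos m, hk, by simpa using ha, hb⟩)
        simp only [Nat.succ_sub_one]
        by_cases ha : pvInWordA (sub.getD m ' ') <;>
          by_cases hb : pvInWordA (sub.getD (m + 1) ' ') <;>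
          simp_all [pvInWordB_eq]

-- ===== VERDICT (by name: the statement is the Claim_ definition above) =====
theorem find_insertion_points_py_spec : Claim_equal_find_insertion_points_py := by
  intro content start_idx _
  exact pvMain (PySem.Chars.slice content.toList (some start_idx) none) start_idx
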